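-- pv_equiv track=rewrite | github.com/Sathishr424/LeetcodeProblems | 2615-MakeNumberOfDistinctCharactersEqual/2615-MakeNumberOfDistinctCharactersEqual.py | isItPossible
-- ===== SOURCE A (Python) =====
-- def isItPossible(word1: str, word2: str) -> bool:
--     x = [0] * 26
--     y = [0] * 26
--
--     x_uniq = 0
--     y_uniq = 0
--
--     for char in word1:
--         x[ord(char) - 97] += 1
--
--     for char in word2:
--         y[ord(char) - 97] += 1
--
--     for i in range(26):
--         x_uniq += x[i] > 0
--         y_uniq += y[i] > 0
--
--     for x_char in range(26):
--         if x[x_char] == 0: continue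
--         x_cnt = x_uniq
--         y_cnt = y_uniq
--
--         if y[x_char] > 0 and x_cnt == y_cnt: return True
--
--         x_cnt -= x[x_char] == 1
--         y_cnt += y[x_char] == 0
--
--         for y_char in range(26):
--             if y[y_char] == 0: continue
--             if y_char == x_char: continue
--             y_ = y_cnt
--             x_ = x_cnt
--
--             if y[y_char] == 1: y_ -= 1
--             if x[y_char] == 0: x_ += 1
--
--             if y_ == x_: return True
--
--     return False
-- ===== SOURCE B (Python) =====
-- def isItPossible(word1: str, word2: str) -> bool:
--     c1 = [0] * 26
--     c2 = [0] * 26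
--     for ch in word1:
--         c1[ord(ch) - 97] += 1
--     for ch in word2:
--         c2[ord(ch) - 97] += 1
--
--     n1 = 0
--     n2 = 0
--     common = False
--     for i in range(26):
--         n1 += c1[i] > 0
--         n2 += c2[i] > 0
--         if c1[i] > 0 and c2[i] > 0:
--             common = True
--
--     # swapping a common letter with itself leaves both distinct counts unchanged
--     if n1 == n2 and common:
--         return True
--
--     d = n1 - n2
--     # classify each present letter by how much swapping it OUT shifts the two
--     # distinct counts: for letter i of word1 the class is (c1[i]==1)+(c2[i]==0),
--     # in {0,1,2}; dually for word2.  A swap of letters i != j works iff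
--     # class1(i) - class2(j) == n1 - n2, which is realisable unless the two
--     # classes hold the same single letter.
--     u0, u1, u2 = [], [], []
--     for i in range(26):
--         if c1[i] > 0:
--             k = (c1[i] == 1) + (c2[i] == 0)
--             if k == 0:
--                 u0.append(i)
--             elif k == 1:
--                 u1.append(i)
--             else:
--                 u2.append(i)
--     v0, v1, v2 = [], [], []
--     for j in range(26):
--         if c2[j] > 0:
--             k = (c2[j] == 1) + (c1[j] == 0)
--             if k == 0:
--                 v0.append(j)
--             elif k == 1:
--                 v1.append(j)
--             else:
--                 v2.append(j)
--     for i, ui in enumerate((u0, u1, u2)):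
--         for j, vj in enumerate((v0, v1, v2)):
--             if i - j == d and ui and vj and (len(ui) > 1 or len(vj) > 1 or ui[0] != vj[0]):
--                 return True
--     return False
-- ===== Notes on version B (the rewrite author's own statement) =====
-- stated objective: alternative
-- what changed: B drops A's all-pairs enumeration of candidate swap letters: after counting, it handles the self-swap case by one common-letter test, classifies each present letter into one of three classes by how much swapping it out shifts the two distinct counts, and decides the answer from only the 3x3 class combinations (a swap of distinct letters works iff class1(a)-class2(b) equals the difference of distinct counts, realisable unless the two classes hold the same single letter).
import Mathlib
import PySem

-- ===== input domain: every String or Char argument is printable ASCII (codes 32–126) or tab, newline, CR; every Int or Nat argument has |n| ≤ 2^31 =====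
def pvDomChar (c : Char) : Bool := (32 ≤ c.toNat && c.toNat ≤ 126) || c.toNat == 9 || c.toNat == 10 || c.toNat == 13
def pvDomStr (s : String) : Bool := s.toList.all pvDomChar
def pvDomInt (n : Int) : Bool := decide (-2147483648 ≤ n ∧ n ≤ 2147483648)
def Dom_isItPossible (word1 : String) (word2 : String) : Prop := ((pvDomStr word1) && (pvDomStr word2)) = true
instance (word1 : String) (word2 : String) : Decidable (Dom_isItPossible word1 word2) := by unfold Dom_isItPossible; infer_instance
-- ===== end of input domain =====

-- B replaces A's all-pairs enumeration of candidate swap letters by a constant-size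
-- classification: each present letter is put into one of three classes by how much swapping
-- it out shifts the two distinct counts, and only the 3×3 class combinations are examined
-- (objective: alternative algorithm).

-- ===== PORT A =====
def isItPossible (word1 : String) (word2 : String) : Bool :=
  let x0 : List Int := List.replicate 26 0
  let y0 : List Int := List.replicate 26 0
  let x := word1.toList.foldl (fun x c =>
      PySem.List.pySetD x ((c.toNat : Int) - 97) (PySem.List.pyGetD x ((c.toNat : Int) - 97) 0 + 1)) x0
  let y := word2.toList.foldl (fun y c =>
      PySem.List.pySetD y ((c.toNat : Int) - 97) (PySem.List.pyGetD y ((c.toNat : Int) - 97) 0 + 1)) y0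
  let uq := (PySem.List.pyRange 0 26 1).foldl (fun (acc : Int × Int) i =>
      (acc.1 + (if 0 < PySem.List.pyGetD x i 0 then 1 else 0),
       acc.2 + (if 0 < PySem.List.pyGetD y i 0 then 1 else 0))) (0, 0)
  let x_uniq := uq.1
  let y_uniq := uq.2
  (PySem.List.pyRange 0 26 1).any (fun x_char =>
    if PySem.List.pyGetD x x_char 0 == 0 then false
    else
      let x_cnt := x_uniq
      let y_cnt := y_uniq
      if 0 < PySem.List.pyGetD y x_char 0 && x_cnt == y_cnt then true
      else
        let x_cnt := x_cnt - (if PySem.List.pyGetD x x_char 0 == 1 then 1 else 0)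
        let y_cnt := y_cnt + (if PySem.List.pyGetD y x_char 0 == 0 then 1 else 0)
        (PySem.List.pyRange 0 26 1).any (fun y_char =>
          if PySem.List.pyGetD y y_char 0 == 0 then false
          else if y_char == x_char then false
          else
            let y_ := y_cnt - (if PySem.List.pyGetD y y_char 0 == 1 then 1 else 0)
            let x_ := x_cnt + (if PySem.List.pyGetD x y_char 0 == 0 then 1 else 0)
            y_ == x_))

-- ===== PORT B =====
-- loop body of B's classification loops ("k = …; if k == 0: … elif k == 1: … else: …")
def pvB_upd {α : Type} (f : α → Int) (u : List α × List α × List α) (a : α) :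
    List α × List α × List α :=
  let k := f a
  if k == 0 then (u.1 ++ [a], u.2.1, u.2.2)
  else if k == 1 then (u.1, u.2.1 ++ [a], u.2.2)
  else (u.1, u.2.1, u.2.2 ++ [a])

def isItPossible_alt (word1 : String) (word2 : String) : Bool :=
  let c1 := word1.toList.foldl (fun x c =>
      PySem.List.pySetD x ((c.toNat : Int) - 97) (PySem.List.pyGetD x ((c.toNat : Int) - 97) 0 + 1))
      (List.replicate 26 (0 : Int))
  let c2 := word2.toList.foldl (fun y c =>
      PySem.List.pySetD y ((c.toNat : Int) - 97) (PySem.List.pyGetD y ((c.toNat : Int) - 97) 0 + 1))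
      (List.replicate 26 (0 : Int))
  let st := (PySem.List.pyRange 0 26 1).foldl (fun (acc : Int × Int × Bool) i =>
      (acc.1 + (if 0 < PySem.List.pyGetD c1 i 0 then 1 else 0),
       acc.2.1 + (if 0 < PySem.List.pyGetD c2 i 0 then 1 else 0),
       acc.2.2 || (decide (0 < PySem.List.pyGetD c1 i 0) && decide (0 < PySem.List.pyGetD c2 i 0)))) (0, 0, false)
  let n1 := st.1
  let n2 := st.2.1
  let common := st.2.2
  if n1 == n2 && common then true
  else
    let d := n1 - n2
    let u := (PySem.List.pyRange 0 26 1).foldl (fun u i =>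
        if 0 < PySem.List.pyGetD c1 i 0 then
          pvB_upd (fun i => (if PySem.List.pyGetD c1 i 0 == 1 then 1 else 0) +
                            (if PySem.List.pyGetD c2 i 0 == 0 then 1 else 0)) u i
        else u) (([], [], []) : List Int × List Int × List Int)
    let v := (PySem.List.pyRange 0 26 1).foldl (fun v j =>
        if 0 < PySem.List.pyGetD c2 j 0 then
          pvB_upd (fun j => (if PySem.List.pyGetD c2 j 0 == 1 then 1 else 0) +
                            (if PySem.List.pyGetD c1 j 0 == 0 then 1 else 0)) v j
        else v) (([], [], []) : List Int × List Int × List Int)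
    -- Python's ui[0]/vj[0] are ported as headD; exact under the preceding nonemptiness guards
    [((0 : Int), u.1), (1, u.2.1), (2, u.2.2)].any (fun iu =>
      [((0 : Int), v.1), (1, v.2.1), (2, v.2.2)].any (fun jv =>
        iu.1 - jv.1 == d && !iu.2.isEmpty && !jv.2.isEmpty &&
          (decide (1 < iu.2.length) || decide (1 < jv.2.length) ||
           iu.2.headD 0 != jv.2.headD 0)))

-- ===== PRECONDITION & SPEC =====
-- Pre_ is exactly the inputs on which A returns normally: a character with code < 71 or > 122
-- makes x[ord(char)-97] raise IndexError (codes 71–96 reach a bucket via Python's negative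
-- indexing and A returns; B counts with the same arrays, so they agree there too).
def Pre_isItPossible (word1 : String) (word2 : String) : Prop :=
  ((word1.toList ++ word2.toList).all (fun c => decide (71 ≤ c.toNat) && decide (c.toNat ≤ 122))) = true
instance (word1 : String) (word2 : String) : Decidable (Pre_isItPossible word1 word2) := by
  unfold Pre_isItPossible; infer_instance
def pvWitness_isItPossible : String × String := ("abcc", "aabd")

def Spec_isItPossible (word1 : String) (word2 : String) (out : Bool) : Prop := out = isItPossible_alt word1 word2
instance (word1 : String) (word2 : String) (out : Bool) : Decidable (Spec_isItPossible word1 word2 out) := by unfold Spec_isItPossible; infer_instance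

-- ===== CLAIM (what is proved, stated in full; the proofs are below) =====
def Claim_equal_isItPossible : Prop := ∀ (word1 : String) (word2 : String), Dom_isItPossible word1 word2 → Pre_isItPossible word1 word2 → Spec_isItPossible word1 word2 (isItPossible word1 word2)

-- ===== LEMMAS AND PROOFS =====

def pvCh (i : Nat) : Char := Char.ofNat (97 + i)

lemma toNat_pvCh (i : Nat) (hi : i < 26) : (pvCh i).toNat = 97 + i := by
  unfold pvCh
  rw [Char.toNat_ofNat, if_pos (Or.inl (by omega))]

lemma pvCh_eq_self (c : Char) (h1 : 97 ≤ c.toNat) (h2 : c.toNat ≤ 122) :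
    pvCh (c.toNat - 97) = c := by
  unfold pvCh
  have : 97 + (c.toNat - 97) = c.toNat := by omega
  rw [this]; exact Char.ofNat_toNat c

lemma pvCh_inj (i j : Nat) (hi : i < 26) (hj : j < 26) (h : pvCh i = pvCh j) : i = j := by
  have := congrArg Char.toNat h
  rw [toNat_pvCh i hi, toNat_pvCh j hj] at this
  omega

-- Python's index ord(c)-97 reaches bucket pvE c (negative indices wrap from the end)
def pvE (c : Char) : Nat := if 97 ≤ c.toNat then c.toNat - 97 else c.toNat - 71

-- the letter a character is counted as by the 26-slot arrays
def pvN (c : Char) : Char := pvCh (pvE c)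

lemma pvE_lt (c : Char) (hc : 71 ≤ c.toNat ∧ c.toNat ≤ 122) : pvE c < 26 := by
  unfold pvE; split_ifs <;> omega

lemma toNat_pvN (c : Char) (hc : 71 ≤ c.toNat ∧ c.toNat ≤ 122) :
    97 ≤ (pvN c).toNat ∧ (pvN c).toNat ≤ 122 := by
  unfold pvN
  rw [toNat_pvCh _ (pvE_lt c hc)]
  have := pvE_lt c hc
  omega

lemma pvN_eq_pvCh_iff (c : Char) (hc : 71 ≤ c.toNat ∧ c.toNat ≤ 122) (i : Nat) (hi : i < 26) :
    pvN c = pvCh i ↔ pvE c = i := by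
  constructor
  · exact fun h => pvCh_inj _ _ (pvE_lt c hc) hi h
  · exact fun h => by rw [pvN, h]

lemma pySetD_neg (xs : List Int) (k : Nat) (hk1 : 0 < k) (hk2 : k ≤ xs.length) (v : Int) :
    PySem.List.pySetD xs (-(k : Int)) v = xs.set (xs.length - k) v := by
  simp only [PySem.List.pySetD, PySem.List.pySet?, PySem.List.pyIdx?]
  rw [if_neg (by omega), if_pos (by omega)]
  simp

lemma pvGetD_wrap (xs : List Int) (hx : xs.length = 26) (c : Char)
    (hc : 71 ≤ c.toNat ∧ c.toNat ≤ 122) (d : Int) :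
    PySem.List.pyGetD xs ((c.toNat : Int) - 97) d = xs.getD (pvE c) d := by
  by_cases h : 97 ≤ c.toNat
  · have hcast : ((c.toNat : Int) - 97) = ((c.toNat - 97 : Nat) : Int) := by omega
    rw [hcast, PySem.List.pyGetD_natCast, pvE, if_pos h]
  · have hk : ((c.toNat : Int) - 97) = -(((97 - c.toNat : Nat) : Int)) := by omega
    have hlt : pvE c < 26 := pvE_lt c hc
    rw [hk, PySem.List.pyGetD_neg_natCast _ _ _ (by omega) (by omega)]
    rw [List.getD_eq_getElem xs d (by rw [hx]; exact hlt)]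
    congr 1
    rw [hx, pvE, if_neg h]
    omega

lemma pvSetD_wrap (xs : List Int) (hx : xs.length = 26) (c : Char)
    (hc : 71 ≤ c.toNat ∧ c.toNat ≤ 122) (v : Int) :
    PySem.List.pySetD xs ((c.toNat : Int) - 97) v = xs.set (pvE c) v := by
  by_cases h : 97 ≤ c.toNat
  · have hcast : ((c.toNat : Int) - 97) = ((c.toNat - 97 : Nat) : Int) := by omega
    rw [hcast, PySem.List.pySetD_natCast, pvE, if_pos h]
  · have hk : ((c.toNat : Int) - 97) = -(((97 - c.toNat : Nat) : Int)) := by omega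
    rw [hk, pySetD_neg _ _ (by omega) (by omega)]
    congr 1
    rw [hx, pvE, if_neg h]
    omega

def pvStep (x : List Int) (c : Char) : List Int :=
  PySem.List.pySetD x ((c.toNat : Int) - 97) (PySem.List.pyGetD x ((c.toNat : Int) - 97) 0 + 1)

lemma pvBuild_getD (L : List Char) (hL : ∀ c ∈ L, 71 ≤ c.toNat ∧ c.toNat ≤ 122)
    (acc : List Int) (hacc : acc.length = 26) (i : Nat) (hi : i < 26) :
    PySem.List.pyGetD (L.foldl pvStep acc) (i : Int) 0
      = PySem.List.pyGetD acc (i : Int) 0 + ((L.map pvN).count (pvCh i) : Int) := by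
  induction L generalizing acc with
  | nil => simp
  | cons c L ih =>
    have hc := hL c (by simp)
    have hEc : pvE c < 26 := pvE_lt c hc
    have hstep : pvStep acc c = acc.set (pvE c) (acc.getD (pvE c) 0 + 1) := by
      rw [pvStep, pvSetD_wrap acc hacc c hc, pvGetD_wrap acc hacc c hc]
    have hlen : (pvStep acc c).length = 26 := by
      rw [hstep, List.length_set, hacc]
    rw [List.foldl_cons, ih (fun d hd => hL d (by simp [hd])) _ hlen]
    rw [hstep, List.map_cons, List.count_cons]
    simp only [PySem.List.pyGetD_natCast, beq_iff_eq]
    have hget : (acc.set (pvE c) (acc.getD (pvE c) 0 + 1)).getD i 0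
        = if i = pvE c then acc.getD (pvE c) 0 + 1 else acc.getD i 0 := by
      by_cases he : i = pvE c
      · subst he
        rw [if_pos rfl, List.getD_eq_getElem _ _ (by simp [hacc, hEc]),
          List.getElem_set_self (by simp [hacc, hEc])]
      · rw [if_neg he, List.getD_eq_getElem _ _ (by simp [hacc, hi]),
          List.getElem_set_ne (fun h => he h.symm) (by simp [hacc, hi])]
        exact (List.getD_eq_getElem _ _ (by rw [hacc]; exact hi)).symm
    rw [hget]
    by_cases he : i = pvE c
    · subst he
      rw [if_pos rfl, if_pos ((pvN_eq_pvCh_iff c hc _ hi).mpr rfl)]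
      push_cast; ring
    · rw [if_neg he, if_neg (fun h => he (((pvN_eq_pvCh_iff c hc _ hi).mp h).symm))]
      push_cast; ring

lemma pvSetLen (L : List Char) (hL : ∀ c ∈ L, 97 ≤ c.toNat ∧ c.toNat ≤ 122) :
    List.countP (fun k => decide (0 < L.count (pvCh k))) (List.range 26)
      = (PySem.Set.ofList L).length := by
  rw [List.countP_eq_length_filter]
  rw [← List.length_map (f := pvCh)]
  have hnd1 : ((List.range 26).filter (fun k => decide (0 < L.count (pvCh k)))).Nodup :=
    List.Nodup.filter _ (List.nodup_range)
  have hnd : (((List.range 26).filter (fun k => decide (0 < L.count (pvCh k)))).map pvCh).Nodup := by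
    refine List.Nodup.map_on ?_ hnd1
    intro p hp q hq h
    exact pvCh_inj p q (by simpa using (List.mem_filter.mp hp).1) (by simpa using (List.mem_filter.mp hq).1) h
  have hperm : (((List.range 26).filter (fun k => decide (0 < L.count (pvCh k)))).map pvCh).Perm (PySem.Set.ofList L) := by
    rw [List.perm_ext_iff_of_nodup hnd (PySem.Set.nodup_ofList L)]
    intro a
    rw [PySem.Set.mem_ofList]
    constructor
    · intro ha
      obtain ⟨k, hk, rfl⟩ := List.mem_map.mp ha
      exact List.count_pos_iff.mp (by simpa using (List.mem_filter.mp hk).2)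
    · intro ha
      have hlow := hL a ha
      refine List.mem_map.mpr ⟨a.toNat - 97, List.mem_filter.mpr ⟨?_, ?_⟩, pvCh_eq_self a hlow.1 hlow.2⟩
      · exact List.mem_range.mpr (by omega)
      · simpa [pvCh_eq_self a hlow.1 hlow.2] using List.count_pos_iff.mpr ha
  exact hperm.length_eq

def pvCond (l1 l2 : List Char) (a b : Char) : Prop :=
  if a = b then ((PySem.Set.ofList l1).length : Int) = ((PySem.Set.ofList l2).length : Int)
  else ((PySem.Set.ofList l2).length : Int) + (if l2.count a = 0 then 1 else 0) - (if l2.count b = 1 then 1 else 0)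
     = ((PySem.Set.ofList l1).length : Int) - (if l1.count a = 1 then 1 else 0) + (if l1.count b = 0 then 1 else 0)

def pvMid (l1 l2 : List Char) : Prop := ∃ a ∈ l1, ∃ b ∈ l2, pvCond l1 l2 a b

lemma pvRange26 : PySem.List.pyRange 0 26 1 = List.map (fun k : Nat => (k : Int)) (List.range 26) := by
  rw [PySem.List.pyRange_one]
  have h26 : ((26:Int) - 0).toNat = 26 := by decide
  rw [h26]
  exact List.map_congr_left (fun k _ => by omega)

lemma pvMainAny (L1 L2 : List Char)
    (hL1 : ∀ c ∈ L1, 97 ≤ c.toNat ∧ c.toNat ≤ 122) (hL2 : ∀ c ∈ L2, 97 ≤ c.toNat ∧ c.toNat ≤ 122)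
    (X Y : List Int) (xu yu : Int)
    (hx : ∀ i : Nat, i < 26 → PySem.List.pyGetD X (i : Int) 0 = (L1.count (pvCh i) : Int))
    (hy : ∀ i : Nat, i < 26 → PySem.List.pyGetD Y (i : Int) 0 = (L2.count (pvCh i) : Int))
    (hxu : xu = ((PySem.Set.ofList L1).length : Int))
    (hyu : yu = ((PySem.Set.ofList L2).length : Int)) :
    (((PySem.List.pyRange 0 26 1).any (fun x_char =>
      if PySem.List.pyGetD X x_char 0 == 0 then false
      else
        let x_cnt := xu
        let y_cnt := yu
        if 0 < PySem.List.pyGetD Y x_char 0 && x_cnt == y_cnt then true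
        else
          let x_cnt := x_cnt - (if PySem.List.pyGetD X x_char 0 == 1 then 1 else 0)
          let y_cnt := y_cnt + (if PySem.List.pyGetD Y x_char 0 == 0 then 1 else 0)
          (PySem.List.pyRange 0 26 1).any (fun y_char =>
            if PySem.List.pyGetD Y y_char 0 == 0 then false
            else if y_char == x_char then false
            else
              let y_ := y_cnt - (if PySem.List.pyGetD Y y_char 0 == 1 then 1 else 0)
              let x_ := x_cnt + (if PySem.List.pyGetD X y_char 0 == 0 then 1 else 0)
              y_ == x_))) = true) ↔ pvMid L1 L2 := by
  rw [pvRange26, List.any_eq_true]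
  constructor
  · rintro ⟨xi, hxi, hbody⟩
    obtain ⟨k, hk, rfl⟩ := List.mem_map.mp hxi
    have hk26 : k < 26 := List.mem_range.mp hk
    simp only [hx k hk26, hy k hk26, hxu, hyu] at hbody
    by_cases h0 : L1.count (pvCh k) = 0
    · simp [h0] at hbody
    have ha : pvCh k ∈ L1 := List.count_pos_iff.mp (Nat.pos_of_ne_zero h0)
    rw [if_neg (by simp [h0])] at hbody
    by_cases hd : 0 < L2.count (pvCh k) ∧
        (PySem.Set.ofList L1).length = (PySem.Set.ofList L2).length
    · exact ⟨pvCh k, ha, pvCh k, List.count_pos_iff.mp hd.1, by simp [pvCond, hd.2]⟩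
    · rw [if_neg (by
        simp only [Bool.and_eq_true, decide_eq_true_eq, beq_iff_eq, Nat.cast_pos, Nat.cast_inj]
        exact fun h => hd h)] at hbody
      rw [List.any_eq_true] at hbody
      obtain ⟨yj, hyj, hjbody⟩ := hbody
      obtain ⟨j, hj, rfl⟩ := List.mem_map.mp hyj
      have hj26 : j < 26 := List.mem_range.mp hj
      simp only [hy j hj26, hx j hj26] at hjbody
      by_cases hj0 : L2.count (pvCh j) = 0
      · simp [hj0] at hjbody
      have hb : pvCh j ∈ L2 := List.count_pos_iff.mp (Nat.pos_of_ne_zero hj0)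
      rw [if_neg (by simp [hj0])] at hjbody
      by_cases hjk : j = k
      · subst hjk; simp at hjbody
      rw [if_neg (by simp [hjk])] at hjbody
      refine ⟨pvCh k, ha, pvCh j, hb, ?_⟩
      have hne : pvCh k ≠ pvCh j := fun h => hjk (pvCh_inj j k hj26 hk26 h.symm)
      rw [pvCond, if_neg hne]
      simpa only [beq_iff_eq, Nat.cast_eq_zero, Nat.cast_eq_one] using hjbody
  · rintro ⟨a, ha, b, hb, hcond⟩
    have hla := hL1 a ha
    have hlb := hL2 b hb
    have hca : ¬ L1.count a = 0 := by
      have := List.count_pos_iff.mpr ha; omega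
    have hcb : ¬ L2.count b = 0 := by
      have := List.count_pos_iff.mpr hb; omega
    set k := a.toNat - 97 with hkdef
    have hk26 : k < 26 := by omega
    have hak : pvCh k = a := pvCh_eq_self a hla.1 hla.2
    refine ⟨(k : Int), List.mem_map.mpr ⟨k, List.mem_range.mpr hk26, rfl⟩, ?_⟩
    simp only [hx k hk26, hy k hk26, hxu, hyu, hak]
    rw [if_neg (by simp [hca])]
    by_cases hd : 0 < L2.count a ∧
        (PySem.Set.ofList L1).length = (PySem.Set.ofList L2).length
    · rw [if_pos (by
        simp only [Bool.and_eq_true, decide_eq_true_eq, beq_iff_eq, Nat.cast_pos, Nat.cast_inj]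
        exact hd)]
    · rw [if_neg (by
        simp only [Bool.and_eq_true, decide_eq_true_eq, beq_iff_eq, Nat.cast_pos, Nat.cast_inj]
        exact fun h => hd h)]
      have hab : ¬ a = b := by
        intro h
        subst h
        rw [pvCond, if_pos rfl] at hcond
        exact hd ⟨List.count_pos_iff.mpr hb, by exact_mod_cast hcond⟩
      set j := b.toNat - 97 with hjdef
      have hj26 : j < 26 := by omega
      have hbj : pvCh j = b := pvCh_eq_self b hlb.1 hlb.2
      rw [List.any_eq_true]
      refine ⟨(j : Int), List.mem_map.mpr ⟨j, List.mem_range.mpr hj26, rfl⟩, ?_⟩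
      simp only [hy j hj26, hx j hj26, hbj]
      rw [if_neg (by simp [hcb])]
      have hjk : ¬ j = k := by
        intro h
        exact hab (by rw [← hak, ← hbj, h])
      rw [if_neg (by simp [hjk])]
      rw [pvCond, if_neg hab] at hcond
      simp only [beq_iff_eq, Nat.cast_eq_zero, Nat.cast_eq_one]
      exact hcond

lemma pvBuildArr_getD (L : List Char) (hL : ∀ c ∈ L, 71 ≤ c.toNat ∧ c.toNat ≤ 122)
    (i : Nat) (hi : i < 26) :
    PySem.List.pyGetD (L.foldl (fun x c =>
      PySem.List.pySetD x ((c.toNat : Int) - 97) (PySem.List.pyGetD x ((c.toNat : Int) - 97) 0 + 1))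
      (List.replicate 26 (0 : Int))) (i : Int) 0 = ((L.map pvN).count (pvCh i) : Int) := by
  have h := pvBuild_getD L hL (List.replicate 26 0) (by simp) i hi
  have h0 : PySem.List.pyGetD (List.replicate 26 (0 : Int)) (i : Int) 0 = 0 := by
    rw [PySem.List.pyGetD_natCast]
    exact List.getD_replicate _ hi
  rw [h0] at h
  simpa using h

lemma pvUniqFold (X Y : List Int) :
    ((PySem.List.pyRange 0 26 1).foldl (fun (acc : Int × Int) i =>
      (acc.1 + (if 0 < PySem.List.pyGetD X i 0 then 1 else 0),
       acc.2 + (if 0 < PySem.List.pyGetD Y i 0 then 1 else 0))) (0, 0))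
    = ((((List.range 26).countP (fun k : Nat => decide (0 < PySem.List.pyGetD X ((k : Nat) : Int) 0))) : Int),
       (((List.range 26).countP (fun k : Nat => decide (0 < PySem.List.pyGetD Y ((k : Nat) : Int) 0))) : Int)) := by
  rw [pvRange26, List.foldl_map]
  rw [PySem.List.foldl_prod_mk
    (f := fun (acc : Int) (k : Nat) => acc + (if 0 < PySem.List.pyGetD X ((k : Nat) : Int) 0 then 1 else 0))
    (g := fun (acc : Int) (k : Nat) => acc + (if 0 < PySem.List.pyGetD Y ((k : Nat) : Int) 0 then 1 else 0))]
  rw [PySem.List.foldl_add (List.range 26)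
    (fun k : Nat => if 0 < PySem.List.pyGetD X ((k : Nat) : Int) 0 then (1:Int) else 0) 0]
  rw [PySem.List.foldl_add (List.range 26)
    (fun k : Nat => if 0 < PySem.List.pyGetD Y ((k : Nat) : Int) 0 then (1:Int) else 0) 0]
  have h1 := PySem.List.sum_map_ite_one_zero
    (fun k : Nat => decide (0 < PySem.List.pyGetD X ((k : Nat) : Int) 0)) (List.range 26)
  have h2 := PySem.List.sum_map_ite_one_zero
    (fun k : Nat => decide (0 < PySem.List.pyGetD Y ((k : Nat) : Int) 0)) (List.range 26)
  simp only [decide_eq_true_eq] at h1 h2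
  rw [h1, h2]
  simp

lemma pvCountP_set (L : List Char) (hraw : ∀ c ∈ L, 71 ≤ c.toNat ∧ c.toNat ≤ 122)
    (X : List Int)
    (hx : ∀ i : Nat, i < 26 → PySem.List.pyGetD X (i : Int) 0 = ((L.map pvN).count (pvCh i) : Int)) :
    ((List.range 26).countP (fun k : Nat => decide (0 < PySem.List.pyGetD X ((k : Nat) : Int) 0)))
      = (PySem.Set.ofList (L.map pvN)).length := by
  rw [List.countP_congr (q := fun k : Nat => decide (0 < List.count (pvCh k) (L.map pvN)))
    (fun k hk => by rw [hx k (List.mem_range.mp hk)]; simp)]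
  exact pvSetLen (L.map pvN) (by
    intro c hc
    obtain ⟨c0, hc0, rfl⟩ := List.mem_map.mp hc
    exact toNat_pvN c0 (hraw c0 hc0))

lemma pvA_iff (word1 word2 : String)
    (h : ∀ c ∈ word1.toList ++ word2.toList, 71 ≤ c.toNat ∧ c.toNat ≤ 122) :
    (isItPossible word1 word2 = true) ↔ pvMid (word1.toList.map pvN) (word2.toList.map pvN) := by
  have hr1 : ∀ c ∈ word1.toList, 71 ≤ c.toNat ∧ c.toNat ≤ 122 := fun c hc => h c (by simp [hc])
  have hr2 : ∀ c ∈ word2.toList, 71 ≤ c.toNat ∧ c.toNat ≤ 122 := fun c hc => h c (by simp [hc])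
  have hL1 : ∀ c ∈ word1.toList.map pvN, 97 ≤ c.toNat ∧ c.toNat ≤ 122 := by
    intro c hc
    obtain ⟨c0, hc0, rfl⟩ := List.mem_map.mp hc
    exact toNat_pvN c0 (hr1 c0 hc0)
  have hL2 : ∀ c ∈ word2.toList.map pvN, 97 ≤ c.toNat ∧ c.toNat ≤ 122 := by
    intro c hc
    obtain ⟨c0, hc0, rfl⟩ := List.mem_map.mp hc
    exact toNat_pvN c0 (hr2 c0 hc0)
  have hx := fun i hi => pvBuildArr_getD word1.toList hr1 i hi
  have hy := fun i hi => pvBuildArr_getD word2.toList hr2 i hi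
  unfold isItPossible
  simp only [pvUniqFold]
  exact pvMainAny (word1.toList.map pvN) (word2.toList.map pvN) hL1 hL2 _ _ _ _ hx hy
    (by exact_mod_cast congrArg (fun n : Nat => (n : Int)) (pvCountP_set word1.toList hr1 _ hx))
    (by exact_mod_cast congrArg (fun n : Nat => (n : Int)) (pvCountP_set word2.toList hr2 _ hy))

-- ===== B-side: the class characterisation =====

def pvUvalN (l1 l2 : List Char) (k : Nat) : Int :=
  (if l1.count (pvCh k) = 1 then 1 else 0) + (if l2.count (pvCh k) = 0 then 1 else 0)

def pvD (l1 l2 : List Char) : Int :=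
  ((PySem.Set.ofList l1).length : Int) - ((PySem.Set.ofList l2).length : Int)

def pvMidI (l1 l2 : List Char) : Prop :=
  ((PySem.Set.ofList l1).length = (PySem.Set.ofList l2).length ∧
    ∃ k, k < 26 ∧ 0 < l1.count (pvCh k) ∧ 0 < l2.count (pvCh k))
  ∨ ∃ i, i < 26 ∧ 0 < l1.count (pvCh i) ∧ ∃ j, j < 26 ∧ 0 < l2.count (pvCh j) ∧ i ≠ j ∧
      pvUvalN l1 l2 i = pvD l1 l2 + pvUvalN l2 l1 j

lemma pvUvalN_bounds (l1 l2 : List Char) (k : Nat) :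
    0 ≤ pvUvalN l1 l2 k ∧ pvUvalN l1 l2 k ≤ 2 := by
  unfold pvUvalN; split_ifs <;> norm_num

lemma pvMid_iff_midI (l1 l2 : List Char)
    (hL1 : ∀ c ∈ l1, 97 ≤ c.toNat ∧ c.toNat ≤ 122)
    (hL2 : ∀ c ∈ l2, 97 ≤ c.toNat ∧ c.toNat ≤ 122) :
    pvMid l1 l2 ↔ pvMidI l1 l2 := by
  constructor
  · rintro ⟨a, ha, b, hb, hc⟩
    have hla := hL1 a ha
    have hlb := hL2 b hb
    have hak : pvCh (a.toNat - 97) = a := pvCh_eq_self a hla.1 hla.2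
    have hbk : pvCh (b.toNat - 97) = b := pvCh_eq_self b hlb.1 hlb.2
    by_cases hab : a = b
    · subst hab
      rw [pvCond, if_pos rfl] at hc
      exact Or.inl ⟨by exact_mod_cast hc, a.toNat - 97, by omega,
        by rw [hak]; exact List.count_pos_iff.mpr ha,
        by rw [hak]; exact List.count_pos_iff.mpr hb⟩
    · rw [pvCond, if_neg hab] at hc
      refine Or.inr ⟨a.toNat - 97, by omega, by rw [hak]; exact List.count_pos_iff.mpr ha,
        b.toNat - 97, by omega, by rw [hbk]; exact List.count_pos_iff.mpr hb,
        fun he => hab (by rw [← hak, ← hbk, he]), ?_⟩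
      unfold pvUvalN pvD
      rw [hak, hbk]
      split_ifs at hc ⊢ <;> omega
  · rintro (⟨hlen, k, hk, h1, h2⟩ | ⟨i, hi, h1, j, hj, h2, hij, heq⟩)
    · exact ⟨pvCh k, List.count_pos_iff.mp h1, pvCh k, List.count_pos_iff.mp h2,
        by rw [pvCond, if_pos rfl]; exact_mod_cast hlen⟩
    · refine ⟨pvCh i, List.count_pos_iff.mp h1, pvCh j, List.count_pos_iff.mp h2, ?_⟩
      have hne : pvCh i ≠ pvCh j := fun h => hij (pvCh_inj i j hi hj h)
      rw [pvCond, if_neg hne]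
      unfold pvUvalN pvD at heq
      split_ifs at heq ⊢ <;> omega

lemma pvBucketFoldG {α : Type} (g : α → Prop) [DecidablePred g] (f : α → Int) (L : List α)
    (t : List α × List α × List α) :
    L.foldl (fun (u : List α × List α × List α) a => if g a then pvB_upd f u a else u) t
      = (t.1 ++ L.filter (fun a => decide (g a) && (f a == 0)),
         t.2.1 ++ L.filter (fun a => decide (g a) && (f a == 1)),
         t.2.2 ++ L.filter (fun a => decide (g a) && (!(f a == 0) && !(f a == 1)))) := by
  induction L generalizing t with
  | nil => simp
  | cons a L ih =>
    simp only [List.foldl_cons, List.filter_cons]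
    by_cases hg : g a
    · rw [if_pos hg]
      by_cases h0 : (f a == 0) = true
      · have h0' : f a = 0 := by simpa using h0
        have h1 : (f a == 1) = false := by simp [h0']
        rw [show pvB_upd f t a = (t.1 ++ [a], t.2.1, t.2.2) by simp [pvB_upd, h0'], ih]
        simp [hg, h0, h1, List.append_assoc]
      · by_cases h1 : (f a == 1) = true
        · rw [show pvB_upd f t a = (t.1, t.2.1 ++ [a], t.2.2) by
            simp only [pvB_upd]; rw [if_neg (by simp [h0]), if_pos h1], ih]
          simp [hg, h0, h1, List.append_assoc]
        · rw [show pvB_upd f t a = (t.1, t.2.1, t.2.2 ++ [a]) by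
            simp only [pvB_upd]; rw [if_neg (by simp [h0]), if_neg (by simp [h1])], ih]
          simp [hg, h0, h1, List.append_assoc]
    · rw [if_neg hg, ih]
      simp [hg]

-- the bucket of class t for the pair (l1, l2): present letters, ascending
def pvBktI (l1 l2 : List Char) (t : Int) : List Int :=
  ((List.range 26).filter (fun k => decide (0 < l1.count (pvCh k)) && (pvUvalN l1 l2 k == t))).map
    (fun k : Nat => (k : Int))

lemma pvBktI_nodup (l1 l2 : List Char) (t : Int) : (pvBktI l1 l2 t).Nodup := by
  refine List.Nodup.map_on ?_ (List.Nodup.filter _ List.nodup_range)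
  intro p _ q _ h
  exact_mod_cast h

lemma pvBktI_mem (l1 l2 : List Char) (t : Int) (x : Int) :
    x ∈ pvBktI l1 l2 t ↔ ∃ k : Nat, k < 26 ∧ 0 < l1.count (pvCh k) ∧ pvUvalN l1 l2 k = t ∧ x = (k : Int) := by
  unfold pvBktI
  rw [List.mem_map]
  constructor
  · rintro ⟨k, hk, rfl⟩
    rw [List.mem_filter] at hk
    refine ⟨k, by simpa using hk.1, ?_, ?_, rfl⟩
    · have := hk.2; simp only [Bool.and_eq_true, decide_eq_true_eq] at this; exact this.1
    · have := hk.2; simp only [Bool.and_eq_true, beq_iff_eq] at this; exact this.2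
  · rintro ⟨k, hk, h1, h2, rfl⟩
    exact ⟨k, List.mem_filter.mpr ⟨List.mem_range.mpr hk, by simp [h1, h2]⟩, rfl⟩

lemma pvPick {α : Type} [DecidableEq α] (A B : List α) (d : α) (hA : A.Nodup) (hB : B.Nodup)
    (hAne : A ≠ []) (hBne : B ≠ [])
    (h : 1 < A.length ∨ 1 < B.length ∨ A.headD d ≠ B.headD d) :
    ∃ a ∈ A, ∃ b ∈ B, a ≠ b := by
  rcases h with h | h | h
  · match A, hA, h with
    | x :: y :: t, hA, _ =>
      have hxy : x ≠ y := by
        simp only [List.nodup_cons, List.mem_cons] at hA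
        exact fun he => hA.1 (Or.inl he)
      have hbB : B.headD d ∈ B := by
        cases B with
        | nil => exact absurd rfl hBne
        | cons b B' => simp
      by_cases hx : x = B.headD d
      · exact ⟨y, by simp, B.headD d, hbB, fun he => hxy (hx.trans he.symm)⟩
      · exact ⟨x, by simp, B.headD d, hbB, hx⟩
  · match B, hB, h with
    | x :: y :: t, hB, _ =>
      have hxy : x ≠ y := by
        simp only [List.nodup_cons, List.mem_cons] at hB
        exact fun he => hB.1 (Or.inl he)
      have haA : A.headD d ∈ A := by
        cases A with
        | nil => exact absurd rfl hAne
        | cons a A' => simp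
      by_cases hx : A.headD d = x
      · exact ⟨A.headD d, haA, y, by simp, fun he => hxy ((hx.symm.trans he).symm ▸ rfl)⟩
      · exact ⟨A.headD d, haA, x, by simp, hx⟩
  · have haA : A.headD d ∈ A := by
      cases A with
      | nil => exact absurd rfl hAne
      | cons a A' => simp
    have hbB : B.headD d ∈ B := by
      cases B with
      | nil => exact absurd rfl hBne
      | cons b B' => simp
    exact ⟨_, haA, _, hbB, h⟩

lemma pvPick' {α : Type} (A B : List α) (d : α) (a b : α) (ha : a ∈ A) (hb : b ∈ B) (hab : a ≠ b) :
    A ≠ [] ∧ B ≠ [] ∧ (1 < A.length ∨ 1 < B.length ∨ A.headD d ≠ B.headD d) := by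
  refine ⟨List.ne_nil_of_mem ha, List.ne_nil_of_mem hb, ?_⟩
  by_cases hAl : 1 < A.length
  · exact Or.inl hAl
  by_cases hBl : 1 < B.length
  · exact Or.inr (Or.inl hBl)
  have hA1 : A.length = 1 := by
    have := List.length_pos_of_mem ha; omega
  have hB1 : B.length = 1 := by
    have := List.length_pos_of_mem hb; omega
  obtain ⟨a', rfl⟩ := List.length_eq_one_iff.mp hA1
  obtain ⟨b', rfl⟩ := List.length_eq_one_iff.mp hB1
  simp only [List.mem_singleton] at ha hb
  subst ha; subst hb
  exact Or.inr (Or.inr (by simpa using hab))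

lemma pvCell (l1 l2 : List Char) (i j : Int)
    (h : (i - j == pvD l1 l2 && !(pvBktI l1 l2 i).isEmpty && !(pvBktI l2 l1 j).isEmpty &&
         (decide (1 < (pvBktI l1 l2 i).length) || decide (1 < (pvBktI l2 l1 j).length) ||
          (pvBktI l1 l2 i).headD 0 != (pvBktI l2 l1 j).headD 0)) = true) :
    ∃ p, p < 26 ∧ 0 < l1.count (pvCh p) ∧ ∃ q, q < 26 ∧ 0 < l2.count (pvCh q) ∧ p ≠ q ∧
      pvUvalN l1 l2 p = pvD l1 l2 + pvUvalN l2 l1 q := by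
  simp only [Bool.and_eq_true, Bool.or_eq_true, Bool.not_eq_eq_eq_not, Bool.not_true,
    List.isEmpty_eq_false_iff, beq_iff_eq, bne_iff_ne, ne_eq, decide_eq_true_eq] at h
  obtain ⟨⟨⟨hd, hAne⟩, hBne⟩, hpick⟩ := h
  obtain ⟨a, haU, b, hbV, hab⟩ :=
    pvPick (pvBktI l1 l2 i) (pvBktI l2 l1 j) 0 (pvBktI_nodup l1 l2 i) (pvBktI_nodup l2 l1 j)
      hAne hBne (by tauto)
  obtain ⟨p, hp, hp1, hp2, rfl⟩ := (pvBktI_mem l1 l2 i a).mp haU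
  obtain ⟨q, hq, hq1, hq2, rfl⟩ := (pvBktI_mem l2 l1 j b).mp hbV
  exact ⟨p, hp, hp1, q, hq, hq1, fun he => hab (by rw [he]), by omega⟩

lemma pvAny_iff (l1 l2 : List Char) :
    (([((0 : Int), pvBktI l1 l2 0), (1, pvBktI l1 l2 1), (2, pvBktI l1 l2 2)].any (fun iu =>
      [((0 : Int), pvBktI l2 l1 0), (1, pvBktI l2 l1 1), (2, pvBktI l2 l1 2)].any (fun jv =>
        iu.1 - jv.1 == pvD l1 l2 && !iu.2.isEmpty && !jv.2.isEmpty &&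
          (decide (1 < iu.2.length) || decide (1 < jv.2.length) ||
           iu.2.headD 0 != jv.2.headD 0)))) = true)
    ↔ (∃ p, p < 26 ∧ 0 < l1.count (pvCh p) ∧ ∃ q, q < 26 ∧ 0 < l2.count (pvCh q) ∧ p ≠ q ∧
        pvUvalN l1 l2 p = pvD l1 l2 + pvUvalN l2 l1 q) := by
  constructor
  · intro h
    rw [List.any_eq_true] at h
    obtain ⟨iu, hiu, h⟩ := h
    rw [List.any_eq_true] at h
    obtain ⟨jv, hjv, h⟩ := h
    simp only [List.mem_cons, List.not_mem_nil, or_false] at hiu hjv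
    rcases hiu with rfl | rfl | rfl <;> rcases hjv with rfl | rfl | rfl <;>
      exact pvCell l1 l2 _ _ h
  · rintro ⟨p, hp, h1, q, hq, h2, hpq, heq⟩
    have hbp := pvUvalN_bounds l1 l2 p
    have hbq := pvUvalN_bounds l2 l1 q
    have haU : ((p : Nat) : Int) ∈ pvBktI l1 l2 (pvUvalN l1 l2 p) :=
      (pvBktI_mem l1 l2 _ _).mpr ⟨p, hp, h1, rfl, rfl⟩
    have hbV : ((q : Nat) : Int) ∈ pvBktI l2 l1 (pvUvalN l2 l1 q) :=
      (pvBktI_mem l2 l1 _ _).mpr ⟨q, hq, h2, rfl, rfl⟩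
    have hmemU : ((pvUvalN l1 l2 p, pvBktI l1 l2 (pvUvalN l1 l2 p)) : Int × List Int) ∈
        [((0 : Int), pvBktI l1 l2 0), (1, pvBktI l1 l2 1), (2, pvBktI l1 l2 2)] := by
      have h3 : pvUvalN l1 l2 p = 0 ∨ pvUvalN l1 l2 p = 1 ∨ pvUvalN l1 l2 p = 2 := by omega
      rcases h3 with h3 | h3 | h3 <;> rw [h3] <;> simp
    have hmemV : ((pvUvalN l2 l1 q, pvBktI l2 l1 (pvUvalN l2 l1 q)) : Int × List Int) ∈
        [((0 : Int), pvBktI l2 l1 0), (1, pvBktI l2 l1 1), (2, pvBktI l2 l1 2)] := by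
      have h3 : pvUvalN l2 l1 q = 0 ∨ pvUvalN l2 l1 q = 1 ∨ pvUvalN l2 l1 q = 2 := by omega
      rcases h3 with h3 | h3 | h3 <;> rw [h3] <;> simp
    rw [List.any_eq_true]
    refine ⟨_, hmemU, ?_⟩
    rw [List.any_eq_true]
    refine ⟨_, hmemV, ?_⟩
    obtain ⟨hAne, hBne, hdisj⟩ := pvPick' _ _ (0 : Int) _ _ haU hbV
      (fun he => hpq (by exact_mod_cast he))
    simp only [Bool.and_eq_true, Bool.or_eq_true, Bool.not_eq_eq_eq_not, Bool.not_true,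
      List.isEmpty_eq_false_iff, beq_iff_eq, bne_iff_ne, ne_eq, decide_eq_true_eq]
    exact ⟨⟨⟨by omega, hAne⟩, hBne⟩, by tauto⟩

lemma pvOrFold {α : Type} (l : List α) (p : α → Bool) (b : Bool) :
    l.foldl (fun b a => b || p a) b = (b || l.any p) := by
  induction l generalizing b with
  | nil => simp
  | cons a l ih => simp [ih, Bool.or_assoc]

lemma pvStatsFold (X Y : List Int) :
    ((PySem.List.pyRange 0 26 1).foldl (fun (acc : Int × Int × Bool) i =>
      (acc.1 + (if 0 < PySem.List.pyGetD X i 0 then 1 else 0),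
       acc.2.1 + (if 0 < PySem.List.pyGetD Y i 0 then 1 else 0),
       acc.2.2 || (decide (0 < PySem.List.pyGetD X i 0) && decide (0 < PySem.List.pyGetD Y i 0)))) (0, 0, false))
    = ((((List.range 26).countP (fun k : Nat => decide (0 < PySem.List.pyGetD X ((k : Nat) : Int) 0))) : Int),
       (((List.range 26).countP (fun k : Nat => decide (0 < PySem.List.pyGetD Y ((k : Nat) : Int) 0))) : Int),
       (List.range 26).any (fun k : Nat =>
         decide (0 < PySem.List.pyGetD X ((k : Nat) : Int) 0) && decide (0 < PySem.List.pyGetD Y ((k : Nat) : Int) 0))) := by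
  rw [pvRange26, List.foldl_map]
  rw [PySem.List.foldl_prod_mk
    (f := fun (acc : Int) (k : Nat) => acc + (if 0 < PySem.List.pyGetD X ((k : Nat) : Int) 0 then 1 else 0))
    (g := fun (acc : Int × Bool) (k : Nat) =>
      (acc.1 + (if 0 < PySem.List.pyGetD Y ((k : Nat) : Int) 0 then 1 else 0),
       acc.2 || (decide (0 < PySem.List.pyGetD X ((k : Nat) : Int) 0) && decide (0 < PySem.List.pyGetD Y ((k : Nat) : Int) 0))))]
  rw [PySem.List.foldl_prod_mk
    (f := fun (acc : Int) (k : Nat) => acc + (if 0 < PySem.List.pyGetD Y ((k : Nat) : Int) 0 then 1 else 0))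
    (g := fun (acc : Bool) (k : Nat) =>
      acc || (decide (0 < PySem.List.pyGetD X ((k : Nat) : Int) 0) && decide (0 < PySem.List.pyGetD Y ((k : Nat) : Int) 0)))]
  rw [PySem.List.foldl_add (List.range 26)
    (fun k : Nat => if 0 < PySem.List.pyGetD X ((k : Nat) : Int) 0 then (1:Int) else 0) 0]
  rw [PySem.List.foldl_add (List.range 26)
    (fun k : Nat => if 0 < PySem.List.pyGetD Y ((k : Nat) : Int) 0 then (1:Int) else 0) 0]
  rw [pvOrFold]
  have h1 := PySem.List.sum_map_ite_one_zero
    (fun k : Nat => decide (0 < PySem.List.pyGetD X ((k : Nat) : Int) 0)) (List.range 26)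
  have h2 := PySem.List.sum_map_ite_one_zero
    (fun k : Nat => decide (0 < PySem.List.pyGetD Y ((k : Nat) : Int) 0)) (List.range 26)
  simp only [decide_eq_true_eq] at h1 h2
  rw [h1, h2]
  simp

lemma pvBktFold_eq (l1 l2 : List Char) (X Y : List Int)
    (hx : ∀ i : Nat, i < 26 → PySem.List.pyGetD X (i : Int) 0 = (l1.count (pvCh i) : Int))
    (hy : ∀ i : Nat, i < 26 → PySem.List.pyGetD Y (i : Int) 0 = (l2.count (pvCh i) : Int)) :
    ((PySem.List.pyRange 0 26 1).foldl (fun u i =>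
        if 0 < PySem.List.pyGetD X i 0 then
          pvB_upd (fun i => (if PySem.List.pyGetD X i 0 == 1 then 1 else 0) +
                            (if PySem.List.pyGetD Y i 0 == 0 then 1 else 0)) u i
        else u) (([], [], []) : List Int × List Int × List Int))
      = (pvBktI l1 l2 0, pvBktI l1 l2 1, pvBktI l1 l2 2) := by
  rw [pvBucketFoldG (g := fun i => 0 < PySem.List.pyGetD X i 0)
    (f := fun i => (if PySem.List.pyGetD X i 0 == 1 then 1 else 0) +
                   (if PySem.List.pyGetD Y i 0 == 0 then 1 else 0))]
  have hcls : ∀ k : Nat, k < 26 →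
      ((if PySem.List.pyGetD X ((k : Nat) : Int) 0 == 1 then (1 : Int) else 0) +
       (if PySem.List.pyGetD Y ((k : Nat) : Int) 0 == 0 then (1 : Int) else 0)) = pvUvalN l1 l2 k := by
    intro k hk
    rw [hx k hk, hy k hk]
    unfold pvUvalN
    by_cases h1 : l1.count (pvCh k) = 1 <;> by_cases h2 : l2.count (pvCh k) = 0 <;>
      simp [h1, h2]
  have hguard : ∀ k : Nat, k < 26 →
      decide (0 < PySem.List.pyGetD X ((k : Nat) : Int) 0) = decide (0 < l1.count (pvCh k)) := by
    intro k hk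
    rw [hx k hk]
    by_cases h0 : 0 < l1.count (pvCh k) <;> simp [h0]
  have hfil : ∀ t : Int,
      ((PySem.List.pyRange 0 26 1).filter (fun i =>
        decide (0 < PySem.List.pyGetD X i 0) &&
        (((if PySem.List.pyGetD X i 0 == 1 then (1 : Int) else 0) +
          (if PySem.List.pyGetD Y i 0 == 0 then (1 : Int) else 0)) == t)))
        = pvBktI l1 l2 t := by
    intro t
    rw [pvRange26, List.filter_map]
    unfold pvBktI
    congr 1
    refine List.filter_congr ?_
    intro k hk
    have hk26 := List.mem_range.mp hk
    simp only [Function.comp]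
    rw [hguard k hk26, hcls k hk26]
  refine Prod.ext ?_ (Prod.ext ?_ ?_) <;> simp only []
  · exact (List.nil_append _).trans (hfil 0)
  · exact (List.nil_append _).trans (hfil 1)
  · refine (List.nil_append _).trans (.trans ?_ (hfil 2))
    refine List.filter_congr ?_
    intro i hi
    congr 1
    have hb : 0 ≤ ((if PySem.List.pyGetD X i 0 == 1 then (1 : Int) else 0) +
        (if PySem.List.pyGetD Y i 0 == 0 then (1 : Int) else 0)) ∧
        ((if PySem.List.pyGetD X i 0 == 1 then (1 : Int) else 0) +
         (if PySem.List.pyGetD Y i 0 == 0 then (1 : Int) else 0)) ≤ 2 := by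
      split_ifs <;> norm_num
    rcases (show ((if PySem.List.pyGetD X i 0 == 1 then (1 : Int) else 0) +
        (if PySem.List.pyGetD Y i 0 == 0 then (1 : Int) else 0)) = 0 ∨
        ((if PySem.List.pyGetD X i 0 == 1 then (1 : Int) else 0) +
         (if PySem.List.pyGetD Y i 0 == 0 then (1 : Int) else 0)) = 1 ∨
        ((if PySem.List.pyGetD X i 0 == 1 then (1 : Int) else 0) +
         (if PySem.List.pyGetD Y i 0 == 0 then (1 : Int) else 0)) = 2 by omega)
      with h3 | h3 | h3 <;> rw [h3] <;> simp

lemma pvD_fold (l1 l2 : List Char) :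
    (((PySem.Set.ofList l1).length : Int) - ((PySem.Set.ofList l2).length : Int)) = pvD l1 l2 := rfl

lemma pvB_iff (word1 word2 : String)
    (h : ∀ c ∈ word1.toList ++ word2.toList, 71 ≤ c.toNat ∧ c.toNat ≤ 122) :
    (isItPossible_alt word1 word2 = true)
      ↔ pvMidI (word1.toList.map pvN) (word2.toList.map pvN) := by
  have hr1 : ∀ c ∈ word1.toList, 71 ≤ c.toNat ∧ c.toNat ≤ 122 := fun c hc => h c (by simp [hc])
  have hr2 : ∀ c ∈ word2.toList, 71 ≤ c.toNat ∧ c.toNat ≤ 122 := fun c hc => h c (by simp [hc])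
  have hx := fun i hi => pvBuildArr_getD word1.toList hr1 i hi
  have hy := fun i hi => pvBuildArr_getD word2.toList hr2 i hi
  have hc1 := pvCountP_set word1.toList hr1 _ hx
  have hc2 := pvCountP_set word2.toList hr2 _ hy
  unfold isItPossible_alt
  simp only [pvStatsFold, pvBktFold_eq _ _ _ _ hx hy, pvBktFold_eq _ _ _ _ hy hx, hc1, hc2,
    pvD_fold]
  have hany : ((List.range 26).any (fun k : Nat =>
      decide (0 < PySem.List.pyGetD (word1.toList.foldl (fun x c =>
        PySem.List.pySetD x ((c.toNat : Int) - 97) (PySem.List.pyGetD x ((c.toNat : Int) - 97) 0 + 1))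
        (List.replicate 26 (0 : Int))) ((k : Nat) : Int) 0) &&
      decide (0 < PySem.List.pyGetD (word2.toList.foldl (fun y c =>
        PySem.List.pySetD y ((c.toNat : Int) - 97) (PySem.List.pyGetD y ((c.toNat : Int) - 97) 0 + 1))
        (List.replicate 26 (0 : Int))) ((k : Nat) : Int) 0)) = true)
      ↔ (∃ k, k < 26 ∧ 0 < (word1.toList.map pvN).count (pvCh k) ∧
          0 < (word2.toList.map pvN).count (pvCh k)) := by
    rw [List.any_eq_true]
    constructor
    · rintro ⟨k, hk, hkk⟩
      have hk26 := List.mem_range.mp hk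
      rw [hx k hk26, hy k hk26] at hkk
      simp only [Bool.and_eq_true, decide_eq_true_eq] at hkk
      exact ⟨k, hk26, by exact_mod_cast hkk.1, by exact_mod_cast hkk.2⟩
    · rintro ⟨k, hk26, h1, h2⟩
      refine ⟨k, List.mem_range.mpr hk26, ?_⟩
      rw [hx k hk26, hy k hk26]
      simp only [Bool.and_eq_true, decide_eq_true_eq]
      exact ⟨by exact_mod_cast h1, by exact_mod_cast h2⟩
  split_ifs with hdg
  · simp only [true_iff]
    simp only [Bool.and_eq_true, beq_iff_eq, Nat.cast_inj] at hdg
    exact Or.inl ⟨hdg.1, hany.mp hdg.2⟩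
  · rw [pvAny_iff]
    constructor
    · intro hh
      exact Or.inr hh
    · rintro (⟨hlen, hcom⟩ | hh)
      · exact absurd (by
          simp only [Bool.and_eq_true, beq_iff_eq, Nat.cast_inj]
          exact ⟨hlen, hany.mpr hcom⟩) hdg
      · exact hh

-- ===== VERDICT (by name: the statement is the Claim_ definition above) =====
theorem isItPossible_spec : Claim_equal_isItPossible := by
  intro word1 word2 _ hpre
  have hpre' : ∀ c ∈ word1.toList ++ word2.toList, 71 ≤ c.toNat ∧ c.toNat ≤ 122 := by
    rw [Pre_isItPossible, List.all_eq_true] at hpre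
    intro c hc
    have := hpre c hc
    simp only [Bool.and_eq_true, decide_eq_true_eq] at this
    omega
  have hL1 : ∀ c ∈ word1.toList.map pvN, 97 ≤ c.toNat ∧ c.toNat ≤ 122 := by
    intro c hc
    obtain ⟨c0, hc0, rfl⟩ := List.mem_map.mp hc
    exact toNat_pvN c0 (hpre' c0 (by simp [hc0]))
  have hL2 : ∀ c ∈ word2.toList.map pvN, 97 ≤ c.toNat ∧ c.toNat ≤ 122 := by
    intro c hc
    obtain ⟨c0, hc0, rfl⟩ := List.mem_map.mp hc
    exact toNat_pvN c0 (hpre' c0 (by simp [hc0]))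
  unfold Spec_isItPossible
  rw [Bool.eq_iff_iff]
  exact (pvA_iff word1 word2 hpre').trans
    ((pvMid_iff_midI _ _ hL1 hL2).trans (pvB_iff word1 word2 hpre').symm)
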